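-- pv_equiv track=rewrite | github.com/SudoSuOps/Swarn-chain | simulator/baseline_b.py | _clamp_grid
-- ===== SOURCE A (Python) =====
-- Grid = list[list[int]]
--
-- def _clamp_grid(grid: Grid, rows: int, cols: int) -> Grid:
--     """Trim or pad a grid to exact (rows, cols)."""
--     result: Grid = []
--     for r in range(rows):
--         if r < len(grid):
--             src = grid[r]
--             new_row = [src[c] if c < len(src) else 0 for c in range(cols)]
--         else:
--             new_row = [0] * cols
--         result.append(new_row)
--     return result
-- ===== SOURCE B (Python) =====
-- Grid = list[list[int]]
--
-- def _clamp_grid(grid: Grid, rows: int, cols: int) -> Grid: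
--     """Trim or pad a grid to exact (rows, cols) via slicing and bulk padding."""
--     c = max(cols, 0)
--     result: Grid = []
--     for src in grid[:max(rows, 0)]:
--         result.append(list(src[:c]) + [0] * (c - len(src)))
--     result.extend([0] * c for _ in range(rows - len(grid)))
--     return result
-- ===== Notes on version B (the rewrite author's own statement) =====
-- stated objective: idiomatic
-- what changed: Replaces A's per-cell comprehension (an if inside a range(cols) loop for every row) with bulk slicing: each kept row is src[:max(cols,0)] plus a zero-pad, missing rows are appended as whole zero rows, so no per-column conditional remains.
import Mathlib
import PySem

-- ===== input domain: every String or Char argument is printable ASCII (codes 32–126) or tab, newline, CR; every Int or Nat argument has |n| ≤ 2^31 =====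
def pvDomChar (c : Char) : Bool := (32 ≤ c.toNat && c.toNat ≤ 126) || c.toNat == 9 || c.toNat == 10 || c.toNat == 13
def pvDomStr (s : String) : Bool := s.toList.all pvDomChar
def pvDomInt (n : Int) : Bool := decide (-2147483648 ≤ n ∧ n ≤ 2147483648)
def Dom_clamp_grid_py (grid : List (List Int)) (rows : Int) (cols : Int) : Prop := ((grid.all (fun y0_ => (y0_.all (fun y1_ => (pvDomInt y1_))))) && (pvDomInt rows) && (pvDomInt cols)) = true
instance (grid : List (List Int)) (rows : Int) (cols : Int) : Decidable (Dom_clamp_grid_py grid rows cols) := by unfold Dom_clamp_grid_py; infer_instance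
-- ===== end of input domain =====

-- B trims/pads by bulk slicing and concatenation instead of A's per-cell comprehension; objective: idiomatic.

-- ===== PORT A =====
-- loop body of A: build new_row for row index r (comprehension over range(cols), or [0]*cols)
def clampRowA (grid : List (List Int)) (cols : Int) (r : Int) : List Int :=
  if r < (grid.length : Int) then
    let src := PySem.List.pyGetD grid r []
    (PySem.List.pyRange 0 cols 1).map (fun c =>
      if c < (src.length : Int) then PySem.List.pyGetD src c 0 else 0)
  else
    List.replicate cols.toNat 0

def clamp_grid_py (grid : List (List Int)) (rows : Int) (cols : Int) : List (List Int) :=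
  (PySem.List.pyRange 0 rows 1).foldl (fun result r => result ++ [clampRowA grid cols r]) []

-- ===== PORT B =====
def clamp_grid_py_alt (grid : List (List Int)) (rows : Int) (cols : Int) : List (List Int) :=
  let c := max cols 0
  let head := (PySem.List.slice grid none (some (max rows 0))).map
    (fun src => PySem.List.slice src none (some c) ++ List.replicate (c - (src.length : Int)).toNat 0)
  head ++ List.replicate (rows - (grid.length : Int)).toNat (List.replicate c.toNat 0)

-- ===== PRECONDITION & SPEC =====
def Spec_clamp_grid_py (grid : List (List Int)) (rows : Int) (cols : Int) (out : List (List Int)) : Prop := out = clamp_grid_py_alt grid rows cols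
instance (grid : List (List Int)) (rows : Int) (cols : Int) (out : List (List Int)) : Decidable (Spec_clamp_grid_py grid rows cols out) := by unfold Spec_clamp_grid_py; infer_instance

-- ===== CLAIM (what is proved, stated in full; the proofs are below) =====
def Claim_equal_clamp_grid_py : Prop := ∀ (grid : List (List Int)) (rows : Int) (cols : Int), Dom_clamp_grid_py grid rows cols → Spec_clamp_grid_py grid rows cols (clamp_grid_py grid rows cols)

-- ===== LEMMAS AND PROOFS =====

-- guarded index map over range(n) = take-then-pad
lemma map_range_guard_eq_take_pad {α β : Type} (g : α → β) (z : β) (d : α) (n : Nat) (xs : List α) :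
    (List.range n).map (fun k => if k < xs.length then g (xs.getD k d) else z)
      = (xs.take n).map g ++ List.replicate (n - xs.length) z := by
  induction n with
  | zero => simp
  | succ n ih =>
    rw [List.range_succ, List.map_append, ih]
    by_cases h : n < xs.length
    · have h0 : n + 1 - xs.length = 0 := by omega
      have hn : n - xs.length = 0 := by omega
      simp [h, h0, hn]
      have hm : n < (xs.map g).length := by simpa using h
      rw [List.take_add_one, List.getElem?_eq_getElem hm]
      simp
    · have hle : xs.length ≤ n := by omega
      rw [List.take_of_length_le hle, List.take_of_length_le (by omega)]
      have hs : n + 1 - xs.length = (n - xs.length) + 1 := by omega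
      rw [hs, List.replicate_succ']
      simp [h]

lemma clampRowA_natCast (grid : List (List Int)) (cols : Int) (k : Nat) :
    clampRowA grid cols (k : Int)
      = if k < grid.length then
          ((grid.getD k []).take cols.toNat
            ++ List.replicate (cols.toNat - (grid.getD k []).length) 0)
        else List.replicate cols.toNat 0 := by
  unfold clampRowA
  rw [PySem.List.pyRange_one]
  simp only [Nat.cast_lt, Int.sub_zero, List.map_map, Function.comp_def, zero_add,
    PySem.List.pyGetD_natCast]
  by_cases h : k < grid.length
  · simp only [h, if_true]
    have := map_range_guard_eq_take_pad (g := fun x : Int => x) (z := (0:Int)) (d := (0:Int))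
      cols.toNat (grid.getD k [])
    simpa using this
  · simp [h]

-- ===== VERDICT (by name: the statement is the Claim_ definition above) =====
theorem clamp_grid_py_spec : Claim_equal_clamp_grid_py := by
  intro grid rows cols _
  unfold Spec_clamp_grid_py clamp_grid_py clamp_grid_py_alt
  rw [PySem.List.foldl_append_singleton_eq_map, PySem.List.pyRange_one]
  rw [PySem.List.slice_to grid (b := max rows 0) (by omega)]
  have hc : max cols 0 = ((cols.toNat : Int)) := by omega
  have hr : (max rows 0).toNat = rows.toNat := by omega
  have hg : (rows - (grid.length : Int)).toNat = rows.toNat - grid.length := by omega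
  simp only [List.nil_append, List.map_map, Int.sub_zero, Function.comp_def, zero_add,
    clampRowA_natCast, hc, hr, hg, Int.toNat_natCast]
  rw [map_range_guard_eq_take_pad
      (g := fun src : List Int => src.take cols.toNat ++ List.replicate (cols.toNat - src.length) 0)
      (z := List.replicate cols.toNat 0) (d := ([] : List Int)) rows.toNat grid]
  congr 1
  apply List.map_congr_left
  intro src _
  rw [PySem.List.slice_to src (b := (cols.toNat : Int)) (by omega)]
  have hrep : (((cols.toNat : Int)) - (src.length : Int)).toNat = cols.toNat - src.length := by omega
  rw [hrep, Int.toNat_natCast]
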